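-- pv_equiv track=rewrite | github.com/nicogordon/chat-gpt-barras | codigo_de_barras.py | calculate_digit_verifier
-- ===== SOURCE A (Python) =====
-- def calculate_digit_verifier(cuit, tipo_comprobante, punto_venta, cai, year, month, day):
--     """
--     Calcula el dígito verificador del módulo 10 para un código de barras AFIP.
--     Los parámetros son:
--     cuit -- el CUIT del emisor del comprobante
--     tipo_comprobante -- el tipo de comprobante (ejemplo: 001 para factura A)
--     punto_venta -- el número de punto de venta
--     cai -- el número de CAI (Código de Autorización de Impresión)
--     year -- el año de emisión del comprobante (en formato YYYY)
--     month -- el mes de emisión del comprobante (en formato MM)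
--     day -- el día de emisión del comprobante (en formato DD)
--     """
--     codigo = f"{cuit}{tipo_comprobante}{punto_venta}{cai}{year}{month}{day}"
--     suma_impares = sum([int(x) for x in codigo[0::2]])
--     suma_pares = sum([int(x) for x in codigo[1::2]])
--     suma_total = suma_impares * 3 + suma_pares
--     digito_verificador = 10 - suma_total % 10
--     if digito_verificador == 10:
--         digito_verificador = 0
--     return digito_verificador
-- ===== SOURCE B (Python) =====
-- def calculate_digit_verifier(cuit, tipo_comprobante, punto_venta, cai, year, month, day):
--     codigo = f"{cuit}{tipo_comprobante}{punto_venta}{cai}{year}{month}{day}"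
--     total = 0
--     for i, c in enumerate(codigo):
--         total += int(c) * (3 if i % 2 == 0 else 1)
--     return (-total) % 10
-- ===== Notes on version B (the rewrite author's own statement) =====
-- stated objective: simpler
-- what changed: Replaces the two parity-slice list comprehensions and the 10->0 conditional fixup with a single enumerate pass accumulating a weighted sum and the closed form (-total) % 10.
import Mathlib
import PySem

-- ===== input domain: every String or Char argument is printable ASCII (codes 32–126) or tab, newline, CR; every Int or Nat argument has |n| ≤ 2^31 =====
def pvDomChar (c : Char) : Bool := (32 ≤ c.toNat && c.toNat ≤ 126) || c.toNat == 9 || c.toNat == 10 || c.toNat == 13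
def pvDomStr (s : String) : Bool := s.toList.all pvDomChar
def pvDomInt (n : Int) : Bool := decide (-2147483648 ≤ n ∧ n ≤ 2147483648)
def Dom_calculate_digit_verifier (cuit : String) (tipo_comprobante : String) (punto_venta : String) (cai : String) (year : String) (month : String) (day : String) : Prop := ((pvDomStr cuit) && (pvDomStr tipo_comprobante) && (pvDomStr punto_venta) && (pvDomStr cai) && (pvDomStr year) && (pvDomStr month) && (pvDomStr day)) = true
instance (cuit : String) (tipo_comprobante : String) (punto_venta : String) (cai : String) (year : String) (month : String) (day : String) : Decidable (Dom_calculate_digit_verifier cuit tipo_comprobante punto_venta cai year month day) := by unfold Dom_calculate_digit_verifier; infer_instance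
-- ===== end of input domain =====

-- B replaces the two parity-slice comprehensions and the 10->0 fixup of A with one
-- enumerate pass over the concatenated string and the closed form (-total) % 10.

-- ===== PORT A =====
-- int(x) for a one-character string x
def pvDigit (c : Char) : Int := (PySem.Int.ofChars? [c]).getD 0

def calculate_digit_verifier (cuit : String) (tipo_comprobante : String) (punto_venta : String) (cai : String) (year : String) (month : String) (day : String) : Int :=
  let codigo : List Char := cuit.toList ++ tipo_comprobante.toList ++ punto_venta.toList ++ cai.toList ++ year.toList ++ month.toList ++ day.toList
  let suma_impares : Int := (((PySem.List.slice? codigo (some 0) none 2).getD []).map pvDigit).sum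
  let suma_pares : Int := (((PySem.List.slice? codigo (some 1) none 2).getD []).map pvDigit).sum
  let suma_total : Int := suma_impares * 3 + suma_pares
  let digito_verificador : Int := 10 - PySem.Int.mod suma_total 10
  if digito_verificador == 10 then 0 else digito_verificador

-- ===== PORT B =====
def calculate_digit_verifier_alt (cuit : String) (tipo_comprobante : String) (punto_venta : String) (cai : String) (year : String) (month : String) (day : String) : Int :=
  let codigo : List Char := cuit.toList ++ tipo_comprobante.toList ++ punto_venta.toList ++ cai.toList ++ year.toList ++ month.toList ++ day.toList
  let total : Int := (PySem.List.enumerate codigo 0).foldl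
    (fun acc p => acc + pvDigit p.2 * (if PySem.Int.mod p.1 2 == 0 then 3 else 1)) 0
  PySem.Int.mod (-total) 10

-- ===== PRECONDITION & SPEC =====
-- Pre_ excludes exactly the inputs on which Python's int(x) raises ValueError: some
-- character of the concatenated code is not a decimal digit.
def Pre_calculate_digit_verifier (cuit : String) (tipo_comprobante : String) (punto_venta : String) (cai : String) (year : String) (month : String) (day : String) : Prop :=
  (cuit.toList ++ tipo_comprobante.toList ++ punto_venta.toList ++ cai.toList ++ year.toList ++ month.toList ++ day.toList).all Char.isDigit = true
instance (cuit : String) (tipo_comprobante : String) (punto_venta : String) (cai : String) (year : String) (month : String) (day : String) : Decidable (Pre_calculate_digit_verifier cuit tipo_comprobante punto_venta cai year month day) := by unfold Pre_calculate_digit_verifier; infer_instance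

def pvWitness_calculate_digit_verifier : String × String × String × String × String × String × String :=
  ("20123456789", "001", "0001", "12345678901234", "2023", "01", "02")

def Spec_calculate_digit_verifier (cuit : String) (tipo_comprobante : String) (punto_venta : String) (cai : String) (year : String) (month : String) (day : String) (out : Int) : Prop := out = calculate_digit_verifier_alt cuit tipo_comprobante punto_venta cai year month day
instance (cuit : String) (tipo_comprobante : String) (punto_venta : String) (cai : String) (year : String) (month : String) (day : String) (out : Int) : Decidable (Spec_calculate_digit_verifier cuit tipo_comprobante punto_venta cai year month day out) := by unfold Spec_calculate_digit_verifier; infer_instance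

-- ===== CLAIM (what is proved, stated in full; the proofs are below) =====
def Claim_equal_calculate_digit_verifier : Prop := ∀ (cuit : String) (tipo_comprobante : String) (punto_venta : String) (cai : String) (year : String) (month : String) (day : String), Dom_calculate_digit_verifier cuit tipo_comprobante punto_venta cai year month day → Pre_calculate_digit_verifier cuit tipo_comprobante punto_venta cai year month day → Spec_calculate_digit_verifier cuit tipo_comprobante punto_venta cai year month day (calculate_digit_verifier cuit tipo_comprobante punto_venta cai year month day)

-- ===== LEMMAS AND PROOFS =====

-- the even-index elements of a list (what xs[0::2] selects)
def pvEvens {α : Type} : List α → List α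
  | [] => []
  | [a] => [a]
  | a :: _ :: t => a :: pvEvens t

-- the odd-index elements (what xs[1::2] selects)
def pvOdds {α : Type} (l : List α) : List α := pvEvens l.tail

lemma pvEvens_cons {α : Type} (b : α) (t : List α) :
    pvEvens (b :: t) = b :: pvOdds t := by
  cases t <;> rfl

lemma pv_filterMap_range_evens {α : Type} (l : List α) :
    List.filterMap (fun k => l[2 * k]?) (List.range ((l.length + 1) / 2)) = pvEvens l := by
  induction l using pvEvens.induct with
  | case1 => simp [pvEvens]
  | case2 a => simp [pvEvens, List.range_succ]
  | case3 a b t ih =>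
    have hc : (((a :: b :: t).length + 1) / 2) = (t.length + 1) / 2 + 1 := by
      simp; omega
    have hx : ∀ x, (a :: b :: t)[2 * (x + 1)]? = t[2 * x]? := by
      intro x
      rw [show 2 * (x + 1) = 2 * x + 1 + 1 by ring]
      simp
    rw [hc, List.range_succ_eq_map, List.filterMap_cons, List.filterMap_map]
    simp only [Function.comp_def, hx, ih, pvEvens]
    simp

lemma pv_slice02 {α : Type} (l : List α) :
    PySem.List.slice? l (some 0) none 2 = some (pvEvens l) := by
  simp only [PySem.List.slice?, PySem.List.sliceIndices]
  norm_num
  have h1 : (fun x : Nat => l[(2 * (x:Int)).toNat]?) = fun x => l[2 * x]? := by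
    funext x
    have hx : (2 * (x:Int)).toNat = 2 * x := by omega
    rw [hx]
  have h2 : (if 0 < l.length then (((l.length : Int) + 2 - 1) / 2).toNat else 0) = (l.length + 1) / 2 := by
    split <;> omega
  rw [h1, h2, pv_filterMap_range_evens]

lemma pv_slice12 {α : Type} (l : List α) :
    PySem.List.slice? l (some 1) none 2 = some (pvOdds l) := by
  cases l with
  | nil => simp [PySem.List.slice?, PySem.List.sliceIndices, pvOdds, pvEvens]
  | cons a t =>
    simp only [PySem.List.slice?, PySem.List.sliceIndices]
    norm_num
    have h1 : (fun x : Nat => (a :: t)[(1 + 2 * (x:Int)).toNat]?) = fun x => t[2 * x]? := by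
      funext x
      have hx : (1 + 2 * (x:Int)).toNat = 2 * x + 1 := by omega
      rw [hx]; simp
    have h2 : (if 0 < t.length then (((t.length : Int) + 2 - 1) / 2).toNat else 0) = (t.length + 1) / 2 := by
      split <;> omega
    rw [h1, h2, pv_filterMap_range_evens]
    rfl

lemma pv_enum_fold (l : List Char) (s acc : Int) (hs : PySem.Int.mod s 2 = 0) :
    (PySem.List.enumerate l s).foldl
      (fun acc p => acc + pvDigit p.2 * (if PySem.Int.mod p.1 2 == 0 then 3 else 1)) acc
    = acc + ((pvEvens l).map pvDigit).sum * 3 + ((pvOdds l).map pvDigit).sum := by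
  induction l using pvEvens.induct generalizing s acc with
  | case1 => simp [PySem.List.enumerate, pvEvens, pvOdds]
  | case2 a =>
    rw [PySem.List.enumerate_cons, PySem.List.enumerate_nil]
    simp only [List.foldl_cons, List.foldl_nil, hs, beq_self_eq_true, if_true]
    simp [pvEvens, pvOdds]
  | case3 a b t ih =>
    have h1 : PySem.Int.mod (s + 1) 2 ≠ 0 := by
      rw [PySem.Int.mod_eq_emod_of_pos (by omega)] at hs ⊢; omega
    have h2 : PySem.Int.mod (s + 1 + 1) 2 = 0 := by
      rw [PySem.Int.mod_eq_emod_of_pos (by omega)] at hs ⊢; omega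
    have hb0 : (PySem.Int.mod s 2 == 0) = true := by rw [hs]; rfl
    have hb1 : (PySem.Int.mod (s + 1) 2 == 0) = false := beq_eq_false_iff_ne.mpr h1
    rw [PySem.List.enumerate_cons, PySem.List.enumerate_cons]
    simp only [List.foldl_cons, hb0, hb1, Bool.false_eq_true, if_true, if_false]
    rw [ih (s + 1 + 1) _ h2]
    simp only [pvEvens, pvOdds, List.tail_cons, pvEvens_cons, List.map_cons, List.sum_cons]
    ring

lemma pv_final (T : Int) :
    (if (10 - PySem.Int.mod T 10) == 10 then (0 : Int) else 10 - PySem.Int.mod T 10)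
    = PySem.Int.mod (-T) 10 := by
  rw [PySem.Int.mod_eq_emod_of_pos (a := T) (by omega),
      PySem.Int.mod_eq_emod_of_pos (a := -T) (by omega)]
  simp only [beq_iff_eq]
  omega

-- ===== VERDICT (by name: the statement is the Claim_ definition above) =====
theorem calculate_digit_verifier_spec : Claim_equal_calculate_digit_verifier := by
  intro cuit tc pv cai y m d _ _
  unfold Spec_calculate_digit_verifier calculate_digit_verifier calculate_digit_verifier_alt
  dsimp only
  rw [pv_slice02, pv_slice12, Option.getD_some, Option.getD_some,
    pv_enum_fold _ 0 0 rfl, zero_add, ← pv_final]
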